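-- pv_equiv track=rewrite | github.com/plaidbait91/TouchDetector | py-dataviz/ext.py | listToXY
-- ===== SOURCE A (Python) =====
-- def listToXY(series):
--     # start = series[0] // 60000
--     start = 0
--     s_dict = dict()
--
--     for t in series:
--         t_val = t // 60000 - start
--         s_dict[t_val] = s_dict.get(t_val, 0) + 1
--
--
--     x = list(s_dict.keys())
--     x.sort()
--     f = {i: s_dict[i] for i in x}
--     y = list(f.values())
--
--     return (x, y)
-- ===== SOURCE B (Python) =====
-- def listToXY(series):
--     buckets = sorted(t // 60000 for t in series)
--     x, y = [], []
--     for b in buckets: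
--         if x and x[-1] == b:
--             y[-1] += 1
--         else:
--             x.append(b)
--             y.append(1)
--     return (x, y)
-- ===== Notes on version B (the rewrite author's own statement) =====
-- stated objective: simpler
-- what changed: Replaces the dict-histogram plus key-sort plus rebuilt lookup dict with a single sort of the minute buckets followed by one linear pass grouping consecutive equal runs into (value, run-length) pairs.
import Mathlib
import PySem

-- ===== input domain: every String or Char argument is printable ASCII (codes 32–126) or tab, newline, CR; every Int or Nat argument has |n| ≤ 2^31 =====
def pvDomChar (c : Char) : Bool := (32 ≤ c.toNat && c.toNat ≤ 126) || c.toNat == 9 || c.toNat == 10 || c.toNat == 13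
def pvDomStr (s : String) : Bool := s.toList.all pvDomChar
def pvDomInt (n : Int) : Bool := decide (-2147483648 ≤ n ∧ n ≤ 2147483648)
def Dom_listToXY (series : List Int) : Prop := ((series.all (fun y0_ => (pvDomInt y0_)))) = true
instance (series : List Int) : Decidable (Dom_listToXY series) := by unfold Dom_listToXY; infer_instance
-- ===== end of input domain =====

-- B replaces A's dict histogram + key sort + rebuilt lookup dict by a sort of the
-- minute buckets followed by one pass grouping consecutive equal runs (simpler).

-- ===== PORT A =====
def listToXY (series : List Int) : List Int × List Int :=
  let start : Int := 0
  let s_dict : PySem.Dict Int Int :=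
    series.foldl (fun d t =>
      let t_val := PySem.Int.floordiv t 60000 - start
      d.insert t_val (d.getD t_val 0 + 1)) PySem.Dict.empty
  let x := PySem.List.sorted s_dict.keys (fun i => i) false
  -- s_dict[i] with i always a key of s_dict: getD is exact here
  let f : PySem.Dict Int Int :=
    x.foldl (fun f i => f.insert i (s_dict.getD i 0)) PySem.Dict.empty
  let y := f.values
  (x, y)

-- ===== PORT B =====
-- loop body of B's grouping pass; y[-1] += 1 only runs with x (hence y) nonempty,
-- so the total forms getLast?/dropLast are exact
def pvGroupStep (p : List Int × List Int) (b : Int) : List Int × List Int :=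
  if p.1 ≠ [] ∧ p.1.getLast? = some b then (p.1, p.2.dropLast ++ [p.2.getLast?.getD 0 + 1])
  else (p.1 ++ [b], p.2 ++ [1])

def listToXY_alt (series : List Int) : List Int × List Int :=
  let buckets := PySem.List.sorted (series.map (fun t => PySem.Int.floordiv t 60000)) (fun b => b) false
  buckets.foldl pvGroupStep ([], [])

-- ===== PRECONDITION & SPEC =====
def Spec_listToXY (series : List Int) (out : List Int × List Int) : Prop := out = listToXY_alt series
instance (series : List Int) (out : List Int × List Int) : Decidable (Spec_listToXY series out) := by unfold Spec_listToXY; infer_instance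

-- ===== CLAIM (what is proved, stated in full; the proofs are below) =====
def Claim_equal_listToXY : Prop := ∀ (series : List Int), Dom_listToXY series → Spec_listToXY series (listToXY series)

-- ===== LEMMAS AND PROOFS =====

-- PySem.List.dedup is a sublist of its argument
lemma pv_dedup_sublist (l : List Int) : (PySem.List.dedup l).Sublist l := by
  induction l using List.reverseRecOn with
  | nil => simp [PySem.List.dedup]
  | append_singleton l' a ih =>
      simp only [PySem.List.dedup_eq_ofList] at *
      rw [PySem.Set.ofList_append_singleton, PySem.Set.add_eq_ite]
      split
      · exact ih.trans (List.sublist_append_left _ _)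
      · exact List.Sublist.append ih (List.Sublist.refl _)

-- dedup of a (≤)-sorted list is strictly increasing
lemma pv_dedup_pairwise_lt (l : List Int) (h : l.Pairwise (· ≤ ·)) :
    (PySem.List.dedup l).Pairwise (· < ·) := by
  have hle : (PySem.List.dedup l).Pairwise (· ≤ ·) := h.sublist (pv_dedup_sublist l)
  have hnd : (PySem.List.dedup l).Nodup := PySem.List.nodup_dedup l
  have := hnd.and hle
  exact this.imp (fun h => lt_of_le_of_ne h.2 h.1)

-- in a (≤)-sorted list, every element is ≤ the last
lemma pv_le_getLast (l : List Int) (h : l.Pairwise (· ≤ ·)) :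
    ∀ b ∈ l, ∀ a, l.getLast? = some a → b ≤ a := by
  induction l using List.reverseRecOn with
  | nil => simp
  | append_singleton l' c ih =>
      intro b hb a ha
      rw [List.getLast?_append_cons] at ha
      simp at ha
      subst ha
      rcases List.mem_append.1 hb with hb | hb
      · exact (List.pairwise_append.1 h).2.2 b hb c (by simp)
      · simp at hb; omega

-- B's grouping pass over a (≤)-sorted list yields the deduped values with their counts
lemma pv_grp (s : List Int) (h : s.Pairwise (· ≤ ·)) :
    s.foldl pvGroupStep ([], []) =
      (PySem.List.dedup s, (PySem.List.dedup s).map (fun b => (s.count b : Int))) := by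
  induction s using List.reverseRecOn with
  | nil => simp [PySem.List.dedup]
  | append_singleton s' a ih =>
      have hp : s'.Pairwise (· ≤ ·) := (List.pairwise_append.1 h).1
      have hle : ∀ b ∈ s', b ≤ a := fun b hb => (List.pairwise_append.1 h).2.2 b hb a (by simp)
      rw [List.foldl_append, ih hp]
      simp only [List.foldl_cons, List.foldl_nil]
      have hd : PySem.List.dedup (s' ++ [a]) =
          if a ∈ s' then PySem.List.dedup s' else PySem.List.dedup s' ++ [a] := by
        simp only [PySem.List.dedup_eq_ofList]
        rw [PySem.Set.ofList_append_singleton, PySem.Set.add_eq_ite]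
        simp [PySem.Set.mem_ofList]
      by_cases hm : a ∈ s'
      · -- a already occurred: the last dedup entry is a; bump its count
        have hmem : a ∈ PySem.List.dedup s' := (PySem.List.mem_dedup _ _).2 hm
        have hne : PySem.List.dedup s' ≠ [] := by intro hnil; rw [hnil] at hmem; simp at hmem
        obtain ⟨c, hc⟩ := Option.isSome_iff_exists.1 (List.getLast?_isSome.2 hne)
        have hlt := pv_dedup_pairwise_lt s' hp
        have hdle : (PySem.List.dedup s').Pairwise (· ≤ ·) := hlt.imp le_of_lt
        have hca : c = a := by
          have h1 : a ≤ c := pv_le_getLast _ hdle a hmem c hc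
          have h2 : c ≤ a := by
            have : c ∈ PySem.List.dedup s' := List.mem_of_getLast? hc
            exact hle c ((PySem.List.mem_dedup _ _).1 this)
          omega
        subst hca
        -- decompose dedup s' as init ++ [c]
        obtain ⟨ini, hini⟩ : ∃ ini, PySem.List.dedup s' = ini ++ [c] := by
          refine ⟨(PySem.List.dedup s').dropLast, ?_⟩
          have hcl : (PySem.List.dedup s').getLast hne = c := by
            have h1 := List.getLast?_eq_some_getLast hne
            rw [h1] at hc; exact Option.some.inj hc
          rw [← hcl]
          exact (List.dropLast_append_getLast hne).symm
        have hnotini : c ∉ ini := by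
          have hndp : (ini ++ [c]).Nodup := hini ▸ PySem.List.nodup_dedup s'
          simp [List.nodup_append] at hndp; tauto
        rw [hd, if_pos hm]
        unfold pvGroupStep
        rw [if_pos ⟨hne, hc⟩]
        dsimp only
        rw [hini]
        congr 1
        rw [List.map_append, List.map_append, List.map_singleton, List.map_singleton]
        rw [List.dropLast_append_of_ne_nil (by simp), List.dropLast_singleton, List.append_nil]
        congr 1
        · apply List.map_congr_left
          intro b hb
          have hbne : b ≠ c := fun hbc => hnotini (hbc ▸ hb)
          simp [List.count_append, List.count_singleton]
          omega
        · rw [List.getLast?_append_cons]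
          simp [List.count_append]
      · -- new value a: append (a, 1)
        have hcond : ¬ (PySem.List.dedup s' ≠ [] ∧ (PySem.List.dedup s').getLast? = some a) := by
          rintro ⟨hne, hc⟩
          exact hm ((PySem.List.mem_dedup _ _).1 (List.mem_of_getLast? hc))
        rw [hd, if_neg hm]
        unfold pvGroupStep
        rw [if_neg hcond]
        dsimp only
        congr 1
        rw [List.map_append]
        congr 1
        · apply List.map_congr_left
          intro b hb
          have hbm : b ∈ s' := (PySem.List.mem_dedup _ _).1 hb
          have hbne : b ≠ a := fun hba => hm (hba ▸ hbm)
          simp [List.count_append, List.count_singleton]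
          omega
        · simp [List.count_append, List.count_singleton, List.count_eq_zero_of_not_mem hm]

theorem listToXY_spec : Claim_equal_listToXY := by
  intro series _
  unfold Spec_listToXY listToXY listToXY_alt
  simp only [sub_zero]
  set g : Int → Int := fun t => PySem.Int.floordiv t 60000 with hg
  set bs : List Int := series.map g with hbs
  set s : List Int := PySem.List.sorted bs (fun b => b) false with hs
  -- A's counting loop is Counter(bs)
  have hcnt : series.foldl (fun d t => d.insert (g t) (d.getD (g t) 0 + 1))
      (PySem.Dict.empty : PySem.Dict Int Int) = PySem.Dict.counter bs := by
    rw [hbs, ← PySem.Dict.foldl_insert_getD_add_one_eq_counter, List.foldl_map]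
  rw [hcnt, PySem.Dict.keys_counter]
  set x : List Int := PySem.List.sorted (PySem.Set.ofList bs) (fun i => i) false with hxdef
  have hsp : s.Pairwise (· ≤ ·) := by
    simpa using PySem.List.sorted_pairwise bs (fun b => b)
  have hx : x = PySem.List.dedup s := by
    rw [hxdef]
    apply PySem.List.sorted_eq_of_perm_of_pairwise_lt
    · rw [List.perm_ext_iff_of_nodup (PySem.List.nodup_dedup s) (PySem.Set.nodup_ofList bs)]
      intro b
      rw [PySem.List.mem_dedup, PySem.Set.mem_ofList, hs, PySem.List.mem_sorted]
    · simpa using pv_dedup_pairwise_lt s hsp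
  have hxnd : x.Nodup := hx ▸ PySem.List.nodup_dedup s
  have hvals : (x.foldl (fun f i => f.insert i ((PySem.Dict.counter bs).getD i 0))
      (PySem.Dict.empty : PySem.Dict Int Int)).values
      = x.map (fun i => ((PySem.Dict.counter bs).getD i 0)) := by
    have hitems := PySem.Dict.items_foldl_insert_fresh (l := x) (k := fun i => i)
      (v := fun i => (PySem.Dict.counter bs).getD i 0)
      (d := (PySem.Dict.empty : PySem.Dict Int Int))
      (by intro a _; simp [PySem.Dict.contains_empty]) (by simpa using hxnd)
    simp only [PySem.Dict.values, hitems, PySem.Dict.empty] at *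
    simp [List.map_map, Function.comp]
  rw [hvals, hx]
  rw [pv_grp s hsp]
  congr 1
  apply List.map_congr_left
  intro b _
  rw [PySem.Dict.getD_counter]
  congr 1
  exact ((PySem.List.sorted_perm bs (fun b => b) false).count_eq b).symm
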